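-- pv_equiv track=rewrite | github.com/Albertree/SOAR-ARC-test | procedural_memory/base_rules/detect/count_diagonal_x.py | _are_all_isolated
-- ===== SOURCE A (Python) =====
-- def _are_all_isolated(grid, color, bg):
--     """Check that all cells of 'color' are isolated (no same-color neighbor)."""
--     h = len(grid)
--     w = len(grid[0]) if grid else 0
--     for r in range(h):
--         for c in range(w):
--             if grid[r][c] != color:
--                 continue
--             for dr, dc in [(-1, 0), (1, 0), (0, -1), (0, 1)]:
--                 nr, nc = r + dr, c + dc
--                 if 0 <= nr < h and 0 <= nc < w and grid[nr][nc] == color: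
--                     return False
--     return True
-- ===== SOURCE B (Python) =====
-- def _are_all_isolated(grid, color, bg):
--     """Check that all cells of 'color' are isolated (no same-color neighbor)."""
--     h = len(grid)
--     w = len(grid[0]) if grid else 0
--     cells = set()
--     for r in range(h):
--         for c in range(w):
--             if grid[r][c] == color:
--                 cells.add((r, c))
--     for (r, c) in cells:
--         if (r, c + 1) in cells or (r + 1, c) in cells:
--             return False
--     return True
-- ===== Notes on version B (the rewrite author's own statement) =====
-- stated objective: simpler
-- what changed: Replaces the in-place 4-direction neighbor scan with bounds checks by a precomputed set of same-color positions, then tests only the right and down neighbor of each position by set membership (adjacency is symmetric, so two directions suffice and no bounds checks are needed).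
-- outside the precondition, e.g. on _are_all_isolated([[3, 3], [3]], 3, 0): A returns False, B raises IndexError
import Mathlib
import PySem

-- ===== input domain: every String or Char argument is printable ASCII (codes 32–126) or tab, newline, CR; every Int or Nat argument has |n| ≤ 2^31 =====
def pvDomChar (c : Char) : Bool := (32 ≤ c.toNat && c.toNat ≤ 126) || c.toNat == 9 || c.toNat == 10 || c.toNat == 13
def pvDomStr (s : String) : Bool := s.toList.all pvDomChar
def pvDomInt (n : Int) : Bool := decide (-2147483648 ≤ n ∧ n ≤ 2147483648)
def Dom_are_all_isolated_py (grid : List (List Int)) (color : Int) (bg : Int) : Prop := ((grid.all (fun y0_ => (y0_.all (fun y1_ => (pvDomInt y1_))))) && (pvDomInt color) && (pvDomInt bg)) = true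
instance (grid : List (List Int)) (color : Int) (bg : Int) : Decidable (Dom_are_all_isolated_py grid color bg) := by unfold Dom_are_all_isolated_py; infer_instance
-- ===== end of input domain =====

-- B replaces A's bounds-checked 4-direction neighbor scan by a precomputed set of
-- same-color positions probed only rightward/downward; equivalence of return values.

-- shared helper: grid[r][c] (none = IndexError; under Pre_ all accessed cells are in range)
def pvCell (grid : List (List Int)) (r c : Int) : Option Int :=
  (PySem.List.pyGet? grid r).bind (fun row => PySem.List.pyGet? row c)

-- ===== PORT A =====
def pvDirs : List (Int × Int) := [(-1, 0), (1, 0), (0, -1), (0, 1)]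

def are_all_isolated_py (grid : List (List Int)) (color : Int) (bg : Int) : Bool :=
  let h : Int := grid.length
  let w : Int := if grid ≠ [] then ((grid.headD []).length : Int) else 0
  (PySem.List.pyRange 0 h 1).all (fun r =>
    (PySem.List.pyRange 0 w 1).all (fun c =>
      if pvCell grid r c ≠ some color then true   -- continue
      else pvDirs.all (fun d =>
        let nr := r + d.1
        let nc := c + d.2
        !decide (0 ≤ nr ∧ nr < h ∧ 0 ≤ nc ∧ nc < w ∧ pvCell grid nr nc = some color))))

-- ===== PORT B =====
def are_all_isolated_py_alt (grid : List (List Int)) (color : Int) (bg : Int) : Bool :=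
  let h : Int := grid.length
  let w : Int := if grid ≠ [] then ((grid.headD []).length : Int) else 0
  let cells : PySem.Set (Int × Int) :=
    (PySem.List.pyRange 0 h 1).foldl (fun s r =>
      (PySem.List.pyRange 0 w 1).foldl (fun s c =>
        if pvCell grid r c = some color then PySem.Set.add s (r, c) else s) s)
      PySem.Set.empty
  cells.all (fun p =>
    !(PySem.Set.contains cells (p.1, p.2 + 1) || PySem.Set.contains cells (p.1 + 1, p.2)))

-- ===== PRECONDITION & SPEC =====
-- Pre_ excludes ragged grids (a row shorter than the first row): there Python A raises
-- IndexError, except when an earlier adjacent same-color pair makes A return False first —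
-- a value B cannot match since B scans the whole grid and raises on the short row.
def Pre_are_all_isolated_py (grid : List (List Int)) (color : Int) (bg : Int) : Prop :=
  ∀ row ∈ grid, (grid.headD []).length ≤ row.length
instance (grid : List (List Int)) (color : Int) (bg : Int) : Decidable (Pre_are_all_isolated_py grid color bg) := by unfold Pre_are_all_isolated_py; infer_instance

def pvWitness_are_all_isolated_py : List (List Int) × Int × Int := ([[1, 0], [0, 1]], 1, 0)

def Spec_are_all_isolated_py (grid : List (List Int)) (color : Int) (bg : Int) (out : Bool) : Prop := out = are_all_isolated_py_alt grid color bg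
instance (grid : List (List Int)) (color : Int) (bg : Int) (out : Bool) : Decidable (Spec_are_all_isolated_py grid color bg out) := by unfold Spec_are_all_isolated_py; infer_instance

-- ===== CLAIM (what is proved, stated in full; the proofs are below) =====
def Claim_equal_are_all_isolated_py : Prop := ∀ (grid : List (List Int)) (color : Int) (bg : Int), Dom_are_all_isolated_py grid color bg → Pre_are_all_isolated_py grid color bg → Spec_are_all_isolated_py grid color bg (are_all_isolated_py grid color bg)

-- ===== LEMMAS AND PROOFS =====

-- generic: membership after folding a step that adds one describable element set-wise
theorem pv_mem_foldl_step {α β : Type} (g : List β → α → List β) (C : α → β → Prop)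
    (hg : ∀ s r y, y ∈ g s r ↔ y ∈ s ∨ C r y) :
    ∀ (l : List α) (s0 : List β) (y : β), y ∈ l.foldl g s0 ↔ y ∈ s0 ∨ ∃ r ∈ l, C r y := by
  intro l
  induction l with
  | nil => simp
  | cons a l ih =>
    intro s0 y
    simp only [List.foldl_cons, ih, hg, List.mem_cons]
    constructor
    · rintro ((h | h) | ⟨r, hr, hc⟩)
      · exact Or.inl h
      · exact Or.inr ⟨a, Or.inl rfl, h⟩
      · exact Or.inr ⟨r, Or.inr hr, hc⟩
    · rintro (h | ⟨r, (rfl | hr), hc⟩)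
      · exact Or.inl (Or.inl h)
      · exact Or.inl (Or.inr hc)
      · exact Or.inr ⟨r, hr, hc⟩

theorem pv_mem_cells (grid : List (List Int)) (color : Int) (h w : Int) (p : Int × Int) :
    p ∈ (PySem.List.pyRange 0 h 1).foldl (fun s r =>
        (PySem.List.pyRange 0 w 1).foldl (fun s c =>
          if pvCell grid r c = some color then PySem.Set.add s (r, c) else s) s)
        (PySem.Set.empty : PySem.Set (Int × Int)) ↔
      (0 ≤ p.1 ∧ p.1 < h) ∧ (0 ≤ p.2 ∧ p.2 < w) ∧ pvCell grid p.1 p.2 = some color := by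
  have hinner : ∀ (r : Int) (s : List (Int × Int)) (y : Int × Int),
      y ∈ (PySem.List.pyRange 0 w 1).foldl (fun s c =>
          if pvCell grid r c = some color then PySem.Set.add s (r, c) else s) s ↔
        y ∈ s ∨ ∃ c ∈ PySem.List.pyRange 0 w 1, pvCell grid r c = some color ∧ y = (r, c) := by
    intro r s y
    refine pv_mem_foldl_step _ (fun c y => pvCell grid r c = some color ∧ y = (r, c)) ?_ _ s y
    intro s c y
    split_ifs with hc
    · simp [PySem.Set.mem_add, hc]
    · simp [hc]
  rw [pv_mem_foldl_step _
        (fun r y => ∃ c ∈ PySem.List.pyRange 0 w 1, pvCell grid r c = some color ∧ y = (r, c))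
        (by intro s r y; exact hinner r s y)]
  simp only [PySem.Set.empty, List.not_mem_nil, false_or, PySem.List.mem_pyRange_one]
  constructor
  · rintro ⟨r, hr, c, hc, hcol, rfl⟩
    exact ⟨hr, hc, hcol⟩
  · rintro ⟨h1, h2, h3⟩
    exact ⟨p.1, h1, p.2, h2, h3, rfl⟩

-- ===== VERDICT (by name: the statement is the Claim_ definition above) =====
theorem are_all_isolated_py_spec : Claim_equal_are_all_isolated_py := by
  intro grid color bg _ _
  unfold Spec_are_all_isolated_py are_all_isolated_py are_all_isolated_py_alt
  simp only []
  set h : Int := (grid.length : Int) with hh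
  set w : Int := if grid ≠ [] then ((grid.headD []).length : Int) else 0 with hw
  set cells := (PySem.List.pyRange 0 h 1).foldl (fun s r =>
      (PySem.List.pyRange 0 w 1).foldl (fun s c =>
        if pvCell grid r c = some color then PySem.Set.add s (r, c) else s) s)
      (PySem.Set.empty : PySem.Set (Int × Int)) with hcells
  have hmem : ∀ p : Int × Int, p ∈ cells ↔
      (0 ≤ p.1 ∧ p.1 < h) ∧ (0 ≤ p.2 ∧ p.2 < w) ∧ pvCell grid p.1 p.2 = some color := by
    intro p; rw [hcells]; exact pv_mem_cells grid color h w p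
  rw [Bool.eq_iff_iff]
  simp only [List.all_eq_true, PySem.List.mem_pyRange_one, Bool.not_eq_eq_eq_not,
    Bool.not_true, Bool.or_eq_false_iff, PySem.Set.contains_eq_listContains,
    List.contains_eq_mem, decide_eq_false_iff_not]
  constructor
  · -- A → B
    intro hA p hp
    rw [hmem] at hp
    obtain ⟨hr, hc, hcol⟩ := hp
    have hA' := hA p.1 hr p.2 hc
    rw [if_neg (not_not_intro hcol), List.all_eq_true] at hA'
    constructor
    · intro hmemR
      rw [hmem] at hmemR
      have := hA' (0, 1) (by simp [pvDirs])
      simp only [Bool.not_eq_eq_eq_not, Bool.not_true, decide_eq_false_iff_not] at this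
      exact this ⟨by omega, by omega, hmemR.2.1.1, hmemR.2.1.2, by simpa using hmemR.2.2⟩
    · intro hmemD
      rw [hmem] at hmemD
      have := hA' (1, 0) (by simp [pvDirs])
      simp only [Bool.not_eq_eq_eq_not, Bool.not_true, decide_eq_false_iff_not] at this
      exact this ⟨hmemD.1.1, hmemD.1.2, by omega, by omega, by simpa using hmemD.2.2⟩
  · -- B → A
    intro hB r hr c hc
    split_ifs with hncol
    · rfl
    have hcol := not_not.mp hncol
    rw [List.all_eq_true]
    intro d hd
    simp only [Bool.not_eq_eq_eq_not, Bool.not_true, decide_eq_false_iff_not]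
    rintro ⟨h1, h2, h3, h4, h5⟩
    have hpc : (r, c) ∈ cells := by rw [hmem]; exact ⟨hr, hc, hcol⟩
    have hpn : (r + d.1, c + d.2) ∈ cells := by rw [hmem]; exact ⟨⟨h1, h2⟩, ⟨h3, h4⟩, h5⟩
    fin_cases hd
    · exact (hB _ hpn).2 (by simpa using hpc)   -- d = (-1, 0): (r-1, c) has down neighbor (r, c)
    · exact (hB _ hpc).2 (by simpa using hpn)   -- d = (1, 0): (r, c) has down neighbor
    · exact (hB _ hpn).1 (by simpa using hpc)   -- d = (0, -1): (r, c-1) has right neighbor (r, c)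
    · exact (hB _ hpc).1 (by simpa using hpn)   -- d = (0, 1): (r, c) has right neighbor
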